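-- pv_equiv track=rewrite | github.com/mmakaay/adventofcode2024 | day14/part2.py | there_could_be_a_tree
-- ===== SOURCE A (Python) =====
-- def there_could_be_a_tree(occupied_spaces, bathroom):
--     w, h = bathroom
--     line_length = 0
--     for y in range(h):
--         for x in range(w):
--             if (x, y) in occupied_spaces:
--                 line_length +=1
--             else:
--                 line_length = 0
--             if line_length > 10:
--                 return True
--     return False
-- ===== SOURCE B (Python) =====
-- def there_could_be_a_tree(occupied_spaces, bathroom):
--     # Linearize: cell (x, y) inside the bathroom has linear index y*w + x; A's scan
--     # (which carries its run counter across row boundaries) returns True exactly when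
--     # 11 consecutive linear indices are all occupied.
--     w, h = bathroom
--     cells = {y * w + x for (x, y) in occupied_spaces if 0 <= x < w and 0 <= y < h}
--     return any(all(i - k in cells for k in range(11)) for i in cells)
-- ===== Notes on version B (the rewrite author's own statement) =====
-- stated objective: faster
-- what changed: Instead of scanning every grid cell with a list membership test, B builds a hash set of linear indices y*w+x of the in-grid occupied points once and asks whether some occupied index has its 10 predecessors occupied too (which exactly reproduces A's run counter that carries across row ends).
import Mathlib
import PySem

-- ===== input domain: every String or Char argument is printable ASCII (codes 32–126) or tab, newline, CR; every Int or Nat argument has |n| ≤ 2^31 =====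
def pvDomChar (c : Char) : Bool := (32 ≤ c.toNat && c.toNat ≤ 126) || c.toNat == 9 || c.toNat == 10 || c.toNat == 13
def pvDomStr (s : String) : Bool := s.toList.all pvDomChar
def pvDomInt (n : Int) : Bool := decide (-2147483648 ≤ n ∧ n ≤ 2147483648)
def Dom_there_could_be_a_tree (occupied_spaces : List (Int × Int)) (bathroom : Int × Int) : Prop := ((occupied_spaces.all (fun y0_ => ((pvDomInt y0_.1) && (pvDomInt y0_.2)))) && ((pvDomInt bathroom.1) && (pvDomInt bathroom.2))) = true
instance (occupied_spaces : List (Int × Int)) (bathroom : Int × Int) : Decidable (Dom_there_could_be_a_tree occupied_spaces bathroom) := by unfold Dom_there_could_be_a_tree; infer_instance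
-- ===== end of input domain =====

-- B replaces A's cell-by-cell grid scan (O(w*h*n)) by a set of linear indices of the
-- occupied in-grid points queried once per occupied point (measured faster); A's run
-- counter deliberately carries over row boundaries, and B's linearization keeps that.

-- ===== PORT A =====
-- inner 'for x in range(w)' loop; none = early 'return True', some ll = fell through with run length ll
def pvInnerA (occ : List (Int × Int)) (y : Int) : List Int → Int → Option Int
  | [], ll => some ll
  | x :: xs, ll =>
    let ll' := if occ.contains (x, y) then ll + 1 else 0
    if ll' > 10 then none else pvInnerA occ y xs ll'

-- outer 'for y in range(h)' loop
def pvOuterA (occ : List (Int × Int)) (w : Int) : List Int → Int → Bool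
  | [], _ => false
  | y :: ys, ll =>
    match pvInnerA occ y (PySem.List.pyRange 0 w 1) ll with
    | none => true
    | some ll' => pvOuterA occ w ys ll'

def there_could_be_a_tree (occupied_spaces : List (Int × Int)) (bathroom : Int × Int) : Bool :=
  pvOuterA occupied_spaces bathroom.1 (PySem.List.pyRange 0 bathroom.2 1) 0

-- ===== PORT B =====
def there_could_be_a_tree_alt (occupied_spaces : List (Int × Int)) (bathroom : Int × Int) : Bool :=
  let w := bathroom.1
  let h := bathroom.2
  let cells : PySem.Set Int := PySem.Set.ofList
    (occupied_spaces.filterMap (fun p =>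
      if 0 ≤ p.1 ∧ p.1 < w ∧ 0 ≤ p.2 ∧ p.2 < h then some (p.2 * w + p.1) else none))
  cells.any (fun i => (PySem.List.pyRange 0 11 1).all (fun k => PySem.Set.contains cells (i - k)))

-- ===== PRECONDITION & SPEC =====
def Spec_there_could_be_a_tree (occupied_spaces : List (Int × Int)) (bathroom : Int × Int) (out : Bool) : Prop := out = there_could_be_a_tree_alt occupied_spaces bathroom
instance (occupied_spaces : List (Int × Int)) (bathroom : Int × Int) (out : Bool) : Decidable (Spec_there_could_be_a_tree occupied_spaces bathroom out) := by unfold Spec_there_could_be_a_tree; infer_instance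

-- ===== CLAIM (what is proved, stated in full; the proofs are below) =====
def Claim_equal_there_could_be_a_tree : Prop := ∀ (occupied_spaces : List (Int × Int)) (bathroom : Int × Int), Dom_there_could_be_a_tree occupied_spaces bathroom → Spec_there_could_be_a_tree occupied_spaces bathroom (there_could_be_a_tree occupied_spaces bathroom)

-- ===== LEMMAS AND PROOFS =====

-- the scan A performs, over the flattened row-major list of cell occupancies
def pvScan : List Bool → Int → Option Int
  | [], ll => some ll
  | b :: bs, ll =>
    let ll' := if b then ll + 1 else 0
    if ll' > 10 then none else pvScan bs ll'

theorem pvInnerA_eq (occ : List (Int × Int)) (y : Int) (xs : List Int) (ll : Int) :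
    pvInnerA occ y xs ll = pvScan (xs.map (fun x => occ.contains (x, y))) ll := by
  induction xs generalizing ll with
  | nil => rfl
  | cons x xs ih =>
    simp only [pvInnerA, pvScan, List.map_cons]
    split
    · split
      · rfl
      · exact ih _
    · split
      · rfl
      · exact ih _

theorem pvScan_append (l1 l2 : List Bool) (ll : Int) :
    pvScan (l1 ++ l2) ll = (pvScan l1 ll).bind (fun x => pvScan l2 x) := by
  induction l1 generalizing ll with
  | nil => rfl
  | cons b bs ih =>
    simp only [List.cons_append, pvScan]
    split
    · split
      · rfl
      · exact ih _
    · split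
      · rfl
      · exact ih _

theorem pvOuterA_eq (occ : List (Int × Int)) (w : Int) (ys : List Int) (ll : Int) :
    pvOuterA occ w ys ll =
      (pvScan (ys.flatMap (fun y => (PySem.List.pyRange 0 w 1).map (fun x => occ.contains (x, y)))) ll).isNone := by
  induction ys generalizing ll with
  | nil => rfl
  | cons y ys ih =>
    simp only [pvOuterA, pvInnerA_eq, List.flatMap_cons, pvScan_append]
    cases pvScan ((PySem.List.pyRange 0 w 1).map fun x => occ.contains (x, y)) ll with
    | none => rfl
    | some ll' => simpa using ih ll'

-- an 11-window of occupied cells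
def pvWin (bs : List Bool) : Prop :=
  ∃ n : ℕ, n + 11 ≤ bs.length ∧ ∀ k < 11, bs.getD (n + k) false = true

theorem pvScan_none_iff (bs : List Bool) (ll : Int) (h0 : 0 ≤ ll) (h10 : ll ≤ 10) :
    pvScan bs ll = none ↔
      pvWin bs ∨ ∃ m : ℕ, m ≤ bs.length ∧ 10 < ll + m ∧ ∀ k < m, bs.getD k false = true := by
  induction bs generalizing ll with
  | nil =>
    constructor
    · intro h; exact absurd h (by simp [pvScan])
    · rintro (⟨n, hn, -⟩ | ⟨m, hm, hllm, -⟩)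
      · simp at hn
      · have hm0 : m = 0 := by simpa using hm
        subst hm0
        exact absurd hllm (by omega)
  | cons b bs ih =>
    unfold pvWin
    cases b with
    | false =>
      show (if (0 : Int) > 10 then none else pvScan bs 0) = none ↔ _
      rw [if_neg (by norm_num)]
      rw [ih 0 le_rfl (by norm_num)]
      unfold pvWin
      constructor
      · rintro (⟨n, hn, hwin⟩ | ⟨m, hm, hllm, hpre⟩)
        · exact Or.inl ⟨n + 1, by simp only [List.length_cons]; omega, fun k hk => by
            simpa [Nat.add_right_comm n 1 k] using hwin k hk⟩
        · exact Or.inl ⟨1, by simp only [List.length_cons]; omega, fun k hk => by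
            simpa [Nat.add_comm 1 k] using hpre k (by omega)⟩
      · rintro (⟨n, hn, hwin⟩ | ⟨m, hm, hllm, hpre⟩)
        · cases n with
          | zero => exact absurd (hwin 0 (by norm_num)) (by simp)
          | succ n =>
            exact Or.inl ⟨n, by simp only [List.length_cons] at hn; omega, fun k hk => by
              simpa [Nat.add_right_comm n 1 k] using hwin k hk⟩
        · cases m with
          | zero => exact absurd hllm (by omega)
          | succ m => exact absurd (hpre 0 (by omega)) (by simp)
    | true =>
      show (if ll + 1 > 10 then none else pvScan bs (ll + 1)) = none ↔ _
      by_cases hexit : ll + 1 > 10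
      · rw [if_pos hexit]
        constructor
        · intro _
          refine Or.inr ⟨1, by simp only [List.length_cons]; omega, by omega, fun k hk => ?_⟩
          have hk0 : k = 0 := by omega
          subst hk0
          rfl
        · intro _
          rfl
      · rw [if_neg hexit]
        rw [ih (ll + 1) (by omega) (by omega)]
        constructor
        · rintro (⟨n, hn, hwin⟩ | ⟨m, hm, hllm, hpre⟩)
          · exact Or.inl ⟨n + 1, by simp only [List.length_cons]; omega, fun k hk => by
              simpa [Nat.add_right_comm n 1 k] using hwin k hk⟩
          · refine Or.inr ⟨m + 1, by simp only [List.length_cons]; omega, by omega, fun k hk => ?_⟩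
            cases k with
            | zero => rfl
            | succ k => simpa using hpre k (by omega)
        · rintro (⟨n, hn, hwin⟩ | ⟨m, hm, hllm, hpre⟩)
          · cases n with
            | zero =>
              refine Or.inr ⟨10, by simp only [List.length_cons] at hn; omega, by omega, fun k hk => ?_⟩
              simpa using hwin (k + 1) (by omega)
            | succ n =>
              exact Or.inl ⟨n, by simp only [List.length_cons] at hn; omega, fun k hk => by
                simpa [Nat.add_right_comm n 1 k] using hwin k hk⟩
          · cases m with
            | zero => exact absurd hllm (by omega)
            | succ m =>
              refine Or.inr ⟨m, by simp only [List.length_cons] at hm; omega, by omega, fun k hk => ?_⟩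
              simpa using hpre (k + 1) (by omega)

theorem pvScan_zero_none_iff (bs : List Bool) : pvScan bs 0 = none ↔ pvWin bs := by
  rw [pvScan_none_iff bs 0 (by norm_num) (by norm_num)]
  constructor
  · rintro (h | ⟨m, hm, h10, hpre⟩)
    · exact h
    · exact ⟨0, by omega, fun k hk => by simpa using hpre k (by omega)⟩
  · exact Or.inl

-- flattening a y-major grid into linear indices
theorem pvGrid_flatMap {α : Type} (g : ℕ → ℕ → α) (H W : ℕ) :
    (List.range H).flatMap (fun y => (List.range W).map (fun x => g x y)) =
      (List.range (H * W)).map (fun i => g (i % W) (i / W)) := by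
  induction H with
  | zero => simp
  | succ H ih =>
    rw [List.range_succ, List.flatMap_append, ih, Nat.succ_mul, List.range_add, List.map_append]
    congr 1
    simp only [List.flatMap_cons, List.flatMap_nil, List.append_nil, List.map_map]
    apply List.map_congr_left
    intro x hx
    simp only [List.mem_range] at hx
    have hW : 0 < W := by omega
    have h1 : (H * W + x) % W = x := by
      rw [Nat.add_comm, Nat.add_mul_mod_self_right, Nat.mod_eq_of_lt hx]
    have h2 : (H * W + x) / W = H := by
      rw [Nat.add_comm, Nat.add_mul_div_right _ _ hW, Nat.div_eq_of_lt hx, Nat.zero_add]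
    simp [h1, h2]

theorem pvWin_map_range (F : ℕ → Bool) (N : ℕ) :
    pvWin ((List.range N).map F) ↔ ∃ n : ℕ, n + 11 ≤ N ∧ ∀ k < 11, F (n + k) = true := by
  unfold pvWin
  simp only [List.length_map, List.length_range]
  constructor
  · rintro ⟨n, hn, hwin⟩
    refine ⟨n, hn, fun k hk => ?_⟩
    have := hwin k hk
    rwa [List.getD_eq_getElem?_getD, List.getElem?_map, List.getElem?_range (by omega),
      Option.map_some, Option.getD_some] at this
  · rintro ⟨n, hn, hwin⟩
    refine ⟨n, hn, fun k hk => ?_⟩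
    rw [List.getD_eq_getElem?_getD, List.getElem?_map, List.getElem?_range (by omega),
      Option.map_some, Option.getD_some]
    exact hwin k hk

-- the source list of B's set: linear indices of the in-grid occupied points
def pvSrc (occ : List (Int × Int)) (w h : Int) : List Int :=
  occ.filterMap (fun p =>
    if 0 ≤ p.1 ∧ p.1 < w ∧ 0 ≤ p.2 ∧ p.2 < h then some (p.2 * w + p.1) else none)

theorem mem_pvSrc_iff (occ : List (Int × Int)) (w h : Int) (j : Int) :
    j ∈ pvSrc occ w h ↔
      ∃ p ∈ occ, (0 ≤ p.1 ∧ p.1 < w ∧ 0 ≤ p.2 ∧ p.2 < h) ∧ j = p.2 * w + p.1 := by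
  simp only [pvSrc, List.mem_filterMap]
  constructor
  · rintro ⟨p, hp, hf⟩
    split at hf
    · exact ⟨p, hp, by assumption, by simpa using hf.symm⟩
    · cases hf
  · rintro ⟨p, hp, hgrid, rfl⟩
    exact ⟨p, hp, by rw [if_pos hgrid]⟩

theorem pvAlt_iff (occ : List (Int × Int)) (w h : Int) :
    there_could_be_a_tree_alt occ (w, h) = true ↔
      ∃ i ∈ pvSrc occ w h, ∀ k : Int, 0 ≤ k → k < 11 → (i - k) ∈ pvSrc occ w h := by
  show (PySem.Set.ofList (pvSrc occ w h)).any _ = true ↔ _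
  rw [List.any_eq_true]
  constructor
  · rintro ⟨i, hi, hall⟩
    rw [PySem.Set.mem_ofList] at hi
    refine ⟨i, hi, fun k hk0 hk11 => ?_⟩
    rw [List.all_eq_true] at hall
    have := hall k (by rw [PySem.List.mem_pyRange_one]; omega)
    rw [PySem.Set.contains_iff, PySem.Set.mem_ofList] at this
    exact this
  · rintro ⟨i, hi, hall⟩
    refine ⟨i, by rw [PySem.Set.mem_ofList]; exact hi, ?_⟩
    rw [List.all_eq_true]
    intro k hk
    rw [PySem.List.mem_pyRange_one] at hk
    rw [PySem.Set.contains_iff, PySem.Set.mem_ofList]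
    exact hall k hk.1 hk.2

theorem pvA_eq_scan (occ : List (Int × Int)) (w h : Int) :
    there_could_be_a_tree occ (w, h) =
      (pvScan ((PySem.List.pyRange 0 h 1).flatMap
        (fun y => (PySem.List.pyRange 0 w 1).map (fun x => occ.contains (x, y)))) 0).isNone := by
  exact pvOuterA_eq occ w _ 0

-- degenerate bathroom: empty grid, both sides false
theorem pv_degenerate (occ : List (Int × Int)) (w h : Int) (hd : w ≤ 0 ∨ h ≤ 0) :
    there_could_be_a_tree occ (w, h) = there_could_be_a_tree_alt occ (w, h) := by
  have hsrc : pvSrc occ w h = [] := by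
    unfold pvSrc
    rw [List.filterMap_eq_nil_iff]
    intro p hp
    rw [if_neg]
    rintro ⟨h1, h2, h3, h4⟩
    rcases hd with hd | hd <;> omega
  have hB : there_could_be_a_tree_alt occ (w, h) = false := by
    show (PySem.Set.ofList (pvSrc occ w h)).any _ = false
    rw [hsrc]
    rfl
  rw [hB, pvA_eq_scan]
  rcases hd with hd | hd
  · rw [show PySem.List.pyRange 0 w 1 = [] from PySem.List.pyRange_one_eq_nil (by omega)]
    simp only [List.map_nil]
    rw [List.flatMap_eq_nil_iff.mpr (fun y _ => rfl)]
    rfl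
  · rw [show PySem.List.pyRange 0 h 1 = [] from PySem.List.pyRange_one_eq_nil (by omega)]
    rfl

-- the core bridge: A's window condition on linear nat indices ↔ B's set condition
theorem pv_main_iff (occ : List (Int × Int)) (w h : Int) (hw : 0 < w) (hh : 0 < h) :
    (∃ n : ℕ, n + 11 ≤ h.toNat * w.toNat ∧
        ∀ k < 11, occ.contains ((((n + k) % w.toNat : ℕ) : Int), (((n + k) / w.toNat : ℕ) : Int)) = true)
    ↔ (∃ i ∈ pvSrc occ w h, ∀ k : Int, 0 ≤ k → k < 11 → (i - k) ∈ pvSrc occ w h) := by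
  have hW : 0 < w.toNat := by omega
  have hwW : (w.toNat : Int) = w := Int.toNat_of_nonneg (by omega)
  have hhH : (h.toNat : Int) = h := Int.toNat_of_nonneg (by omega)
  constructor
  · rintro ⟨n, hn, hF⟩
    have hmem : ∀ m : ℕ, m < h.toNat * w.toNat →
        occ.contains (((m % w.toNat : ℕ) : Int), ((m / w.toNat : ℕ) : Int)) = true →
        ((m : ℕ) : Int) ∈ pvSrc occ w h := by
      intro m hm hc
      rw [List.contains_iff_mem] at hc
      rw [mem_pvSrc_iff]
      refine ⟨(((m % w.toNat : ℕ) : Int), ((m / w.toNat : ℕ) : Int)), hc, ⟨?_, ?_, ?_, ?_⟩, ?_⟩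
      · exact Int.natCast_nonneg _
      · have hlt : m % w.toNat < w.toNat := Nat.mod_lt _ hW
        calc ((m % w.toNat : ℕ) : Int) < (w.toNat : Int) := by exact_mod_cast hlt
          _ = w := hwW
      · exact Int.natCast_nonneg _
      · have hlt : m / w.toNat < h.toNat := Nat.div_lt_of_lt_mul (by rw [Nat.mul_comm]; omega)
        calc ((m / w.toNat : ℕ) : Int) < (h.toNat : Int) := by exact_mod_cast hlt
          _ = h := hhH
      · have hdm : w.toNat * (m / w.toNat) + m % w.toNat = m := Nat.div_add_mod m w.toNat
        have hcast : ((m : ℕ) : Int)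
            = (w.toNat : Int) * ((m / w.toNat : ℕ) : Int) + ((m % w.toNat : ℕ) : Int) := by
          exact_mod_cast (congrArg (fun t : ℕ => (t : Int)) hdm).symm
        rw [hcast, hwW]
        ring
    refine ⟨((n : ℕ) : Int) + 10, ?_, ?_⟩
    · have := hmem (n + 10) (by omega) (hF 10 (by omega))
      simpa using this
    · intro k hk0 hk11
      have hkk : (k.toNat : Int) = k := Int.toNat_of_nonneg hk0
      have hcast : ((n : ℕ) : Int) + 10 - k = ((n + (10 - k.toNat) : ℕ) : Int) := by
        push_cast
        omega
      rw [hcast]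
      exact hmem _ (by omega) (hF (10 - k.toNat) (by omega))
  · rintro ⟨i, hi, hall⟩
    have hlow : 10 ≤ i := by
      have h10 := hall 10 (by norm_num) (by norm_num)
      rw [mem_pvSrc_iff] at h10
      obtain ⟨p, -, ⟨hg1, hg2, hg3, hg4⟩, hev⟩ := h10
      have hge : 0 ≤ p.2 * w := mul_nonneg hg3 hw.le
      linarith
    have hhigh : i < w * h := by
      rw [mem_pvSrc_iff] at hi
      obtain ⟨p, -, ⟨hg1, hg2, hg3, hg4⟩, rfl⟩ := hi
      nlinarith [mul_le_mul_of_nonneg_right (show p.2 ≤ h - 1 by omega) hw.le]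
    have hWH : ((h.toNat * w.toNat : ℕ) : Int) = w * h := by
      push_cast [hwW, hhH]
      ring
    refine ⟨(i - 10).toNat, ?_, ?_⟩
    · have e3 : ((i - 10).toNat : Int) = i - 10 := Int.toNat_of_nonneg (by omega)
      omega
    · intro k hk
      have hk' : (0 : Int) ≤ 10 - (k : Int) := by omega
      have hmem := hall (10 - (k : Int)) hk' (by omega)
      rw [mem_pvSrc_iff] at hmem
      obtain ⟨p, hp, ⟨hg1, hg2, hg3, hg4⟩, hev⟩ := hmem
      have e1 : (p.1.toNat : Int) = p.1 := Int.toNat_of_nonneg hg1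
      have e2 : (p.2.toNat : Int) = p.2 := Int.toNat_of_nonneg hg3
      have e3 : ((i - 10).toNat : Int) = i - 10 := Int.toNat_of_nonneg (by omega)
      have hnat : (i - 10).toNat + k = p.2.toNat * w.toNat + p.1.toNat := by
        have key : (((i - 10).toNat + k : ℕ) : Int)
            = ((p.2.toNat * w.toNat + p.1.toNat : ℕ) : Int) := by
          push_cast [e1, e2, e3, hwW]
          linarith
        exact_mod_cast key
      have hp1 : p.1.toNat < w.toNat := by omega
      have hmod : (p.2.toNat * w.toNat + p.1.toNat) % w.toNat = p.1.toNat := by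
        rw [Nat.add_comm, Nat.add_mul_mod_self_right, Nat.mod_eq_of_lt hp1]
      have hdiv : (p.2.toNat * w.toNat + p.1.toNat) / w.toNat = p.2.toNat := by
        rw [Nat.add_comm, Nat.add_mul_div_right _ _ hW, Nat.div_eq_of_lt hp1, Nat.zero_add]
      rw [hnat, hmod, hdiv, List.contains_iff_mem, e1, e2]
      simpa using hp

-- ===== VERDICT (by name: the statement is the Claim_ definition above) =====
theorem there_could_be_a_tree_spec : Claim_equal_there_could_be_a_tree := by
  intro occ bathroom _
  unfold Spec_there_could_be_a_tree
  obtain ⟨w, h⟩ := bathroom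
  by_cases hdeg : w ≤ 0 ∨ h ≤ 0
  · exact pv_degenerate occ w h hdeg
  · have hw : 0 < w := by omega
    have hh : 0 < h := by omega
    rw [Bool.eq_iff_iff]
    rw [pvA_eq_scan, Option.isNone_iff_eq_none, pvScan_zero_none_iff, pvAlt_iff]
    rw [← pv_main_iff occ w h hw hh]
    have hflat :
        (PySem.List.pyRange 0 h 1).flatMap
            (fun y => (PySem.List.pyRange 0 w 1).map (fun x => occ.contains (x, y))) =
          (List.range (h.toNat * w.toNat)).map
            (fun i => occ.contains (((i % w.toNat : ℕ) : Int), ((i / w.toNat : ℕ) : Int))) := by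
      rw [PySem.List.pyRange_one 0 h, PySem.List.pyRange_one 0 w]
      simp only [zero_add, Int.sub_zero, List.flatMap_map, List.map_map]
      exact pvGrid_flatMap (fun x y => occ.contains ((x : Int), (y : Int))) h.toNat w.toNat
    rw [hflat, pvWin_map_range]
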